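-- pv_equiv track=rewrite | github.com/hanglider/ACMP | 032.py | cnv
-- ===== SOURCE A (Python) =====
-- def cnv(n):
--     if n == 0:
--         return 0
--
--     if n > 0:
--         return int(''.join(sorted(str(n), reverse=True)))
--     else:
--         s = sorted(str(abs(n)))
--         k = 0
--         while s[k] == '0':
--             k += 1
--         s = s[k] + '0' * (k) + ''.join(s[k+1:])
--         return -int(s)
-- ===== SOURCE B (Python) =====
-- def cnv(n):
--     if n == 0:
--         return 0
--     digits = list(str(abs(n)))
--     if n > 0:
--         return int(''.join(ch * digits.count(ch) for ch in "9876543210"))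
--     lead = min(ch for ch in digits if ch != '0')
--     rest = ''.join(ch * (digits.count(ch) - (ch == lead)) for ch in "123456789")
--     return -int(lead + '0' * digits.count('0') + rest)
-- ===== Notes on version B (the rewrite author's own statement) =====
-- stated objective: alternative
-- what changed: Replaces sorted()+leading-zero while-scan+index/slice surgery with per-digit counting: B counts each digit's occurrences in str(abs(n)) and reconstructs the answer directly (digits 9..0 for n>0; for n<0 the smallest non-zero digit, then all zeros, then the remaining digits ascending).
import Mathlib
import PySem

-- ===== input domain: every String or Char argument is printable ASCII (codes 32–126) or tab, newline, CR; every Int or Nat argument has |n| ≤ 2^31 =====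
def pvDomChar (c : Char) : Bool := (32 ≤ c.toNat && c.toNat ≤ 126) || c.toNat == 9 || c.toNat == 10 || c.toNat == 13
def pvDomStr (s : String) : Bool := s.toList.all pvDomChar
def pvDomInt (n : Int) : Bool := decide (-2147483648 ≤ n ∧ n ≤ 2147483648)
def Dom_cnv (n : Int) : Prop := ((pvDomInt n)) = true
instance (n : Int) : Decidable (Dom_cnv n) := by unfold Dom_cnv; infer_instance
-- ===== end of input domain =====

-- B replaces A's sorted()+leading-zero scan+slicing with per-digit counting over the
-- literal digit alphabet and direct reconstruction (objective: alternative algorithm).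

-- ===== PORT A =====
-- the loop 'k = 0; while s[k] == "0": k += 1' as structural recursion over s
def cnvSkip : List Char → Nat
  | [] => 0
  | c :: t => if c == '0' then cnvSkip t + 1 else 0

def cnv (n : Int) : Int :=
  if n == 0 then 0
  else if n > 0 then
    (PySem.Int.ofChars? (PySem.List.sorted (PySem.Int.toChars n) (fun c => c) true)).getD 0
  else
    -(let s := PySem.List.sorted (PySem.Int.toChars |n|) (fun c => c) false
      let k := cnvSkip s
      let s' := [(PySem.List.pyGet? s (k : Int)).getD '0'] ++
                PySem.List.pyRepeat ['0'] (k : Int) ++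
                PySem.List.slice s (some ((k : Int) + 1)) none
      (PySem.Int.ofChars? s').getD 0)

-- ===== PORT B =====
def cnv_alt (n : Int) : Int :=
  if n == 0 then 0
  else
    let digits := PySem.Int.toChars |n|
    if n > 0 then
      (PySem.Int.ofChars? (['9','8','7','6','5','4','3','2','1','0'].flatMap
        (fun ch => PySem.List.pyRepeat [ch] (PySem.List.count digits ch : Int)))).getD 0
    else
      -(let lead := (PySem.List.min? (digits.filter (fun c => c != '0')) (fun c => c)).getD '0'
        let rest := ['1','2','3','4','5','6','7','8','9'].flatMap
          (fun ch => PySem.List.pyRepeat [ch]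
            ((PySem.List.count digits ch : Int) - (if ch == lead then 1 else 0)))
        (PySem.Int.ofChars? ([lead] ++
          PySem.List.pyRepeat ['0'] (PySem.List.count digits '0' : Int) ++ rest)).getD 0)

-- ===== PRECONDITION & SPEC =====
def Spec_cnv (n : Int) (out : Int) : Prop := out = cnv_alt n
instance (n : Int) (out : Int) : Decidable (Spec_cnv n out) := by unfold Spec_cnv; infer_instance

-- ===== CLAIM (what is proved, stated in full; the proofs are below) =====
def Claim_equal_cnv : Prop := ∀ (n : Int), Dom_cnv n → Spec_cnv n (cnv n)

-- ===== LEMMAS AND PROOFS =====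

def pvDigits : List Char := ['0','1','2','3','4','5','6','7','8','9']

def pvBlocks (l : List Char) (ds : List Char) : List Char :=
  ds.flatMap (fun c => List.replicate (l.count c) c)

theorem pvDigitChar_mem (k : Nat) (h : k < 10) : Nat.digitChar k ∈ pvDigits := by
  interval_cases k <;> decide

theorem pvToDigitsCore_mem :
    ∀ (f n : Nat) (ds : List Char), (∀ c ∈ ds, c ∈ pvDigits) →
      ∀ c ∈ Nat.toDigitsCore 10 f n ds, c ∈ pvDigits := by
  intro f
  induction f with
  | zero =>
    intro n ds h c hc
    simp only [Nat.toDigitsCore] at hc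
    exact h c hc
  | succ f ih =>
    intro n ds h c hc
    have hstep : Nat.toDigitsCore 10 (f+1) n ds =
        if n / 10 = 0 then (n % 10).digitChar :: ds
        else Nat.toDigitsCore 10 f (n / 10) ((n % 10).digitChar :: ds) := by
      simp [Nat.toDigitsCore]
    rw [hstep] at hc
    have hds' : ∀ c' ∈ (n % 10).digitChar :: ds, c' ∈ pvDigits := by
      intro c' hc'
      rcases List.mem_cons.mp hc' with rfl | h'
      · exact pvDigitChar_mem _ (Nat.mod_lt _ (by norm_num))
      · exact h c' h'
    by_cases h10 : n / 10 = 0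
    · rw [if_pos h10] at hc
      exact hds' c hc
    · rw [if_neg h10] at hc
      exact ih (n/10) _ hds' c hc

theorem pvToDigitsCore_exists :
    ∀ (f n : Nat) (ds : List Char), 0 < n → n ≤ f →
      ∃ c ∈ Nat.toDigitsCore 10 f n ds, c ≠ '0' := by
  intro f
  induction f with
  | zero => intro n ds hn hf; omega
  | succ f ih =>
    intro n ds hn hf
    have hstep : Nat.toDigitsCore 10 (f+1) n ds =
        if n / 10 = 0 then (n % 10).digitChar :: ds
        else Nat.toDigitsCore 10 f (n / 10) ((n % 10).digitChar :: ds) := by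
      simp [Nat.toDigitsCore]
    rw [hstep]
    by_cases h10 : n / 10 = 0
    · rw [if_pos h10]
      have hlt : n < 10 := by omega
      have hmod : n % 10 = n := Nat.mod_eq_of_lt hlt
      refine ⟨(n % 10).digitChar, List.mem_cons_self, ?_⟩
      rw [hmod]
      interval_cases n <;> decide
    · rw [if_neg h10]
      exact ih (n/10) _ (Nat.pos_of_ne_zero h10) (by omega)

theorem pvToChars_mem (m : Int) (hm : 0 ≤ m) :
    ∀ c ∈ PySem.Int.toChars m, c ∈ pvDigits := by
  intro c hc
  unfold PySem.Int.toChars at hc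
  rw [if_neg (by omega)] at hc
  exact pvToDigitsCore_mem (m.toNat + 1) m.toNat [] (by simp) c hc

theorem pvToChars_exists (m : Int) (hm : 0 < m) :
    ∃ c ∈ PySem.Int.toChars m, c ≠ '0' := by
  unfold PySem.Int.toChars
  rw [if_neg (by omega)]
  exact pvToDigitsCore_exists (m.toNat + 1) m.toNat [] (by omega) (by omega)

theorem pvBlocks_count (l : List Char) (x : Char) :
    ∀ ds : List Char, ds.Nodup →
      (pvBlocks l ds).count x = if x ∈ ds then l.count x else 0 := by
  intro ds
  induction ds with
  | nil => intro _; simp [pvBlocks]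
  | cons c ds ih =>
    intro hnd
    rw [List.nodup_cons] at hnd
    simp only [pvBlocks, List.flatMap_cons] at *
    rw [List.count_append, List.count_replicate, ih hnd.2]
    by_cases h1 : x = c
    · subst h1
      simp [hnd.1]
    · by_cases h2 : x ∈ ds <;> simp [h1, h2, Ne.symm h1]

theorem pvBlocks_perm (l : List Char) (ds : List Char) (hnd : ds.Nodup)
    (hcov : ∀ c ∈ l, c ∈ ds) : (pvBlocks l ds).Perm l := by
  rw [List.perm_iff_count]
  intro a
  rw [show (pvBlocks l ds).count a = List.count a (pvBlocks l ds) from rfl]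
  rw [pvBlocks_count l a ds hnd]
  by_cases h : a ∈ ds
  · simp [h]
  · simp only [h, if_false]
    exact (List.count_eq_zero.mpr (fun hal => h (hcov a hal))).symm

theorem pvBlocks_pairwise (l : List Char) (R : Char → Char → Prop)
    (hrefl : ∀ c, R c c) :
    ∀ ds : List Char, ds.Pairwise R → (pvBlocks l ds).Pairwise R := by
  intro ds
  induction ds with
  | nil => intro _; simp [pvBlocks]
  | cons c ds ih =>
    intro hds
    rw [List.pairwise_cons] at hds
    simp only [pvBlocks, List.flatMap_cons]
    rw [List.pairwise_append]
    refine ⟨List.pairwise_replicate.mpr (Or.inr (hrefl c)), ih hds.2, ?_⟩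
    intro a ha b hb
    rw [List.eq_of_mem_replicate ha]
    simp only [List.mem_flatMap] at hb
    obtain ⟨d, hd, hbd⟩ := hb
    rw [List.eq_of_mem_replicate hbd]
    exact hds.1 d hd

theorem pvSorted_asc (l : List Char) (hd : ∀ c ∈ l, c ∈ pvDigits) :
    PySem.List.sorted l (fun c => c) false = pvBlocks l pvDigits := by
  refine PySem.List.eq_of_perm_of_pairwise_le_of_injective (fun c : Char => c)
    (fun a b h => h) ?_ ?_ ?_
  · exact (PySem.List.sorted_perm l _ false).trans (pvBlocks_perm l pvDigits (by decide) hd).symm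
  · exact PySem.List.sorted_pairwise l _
  · exact pvBlocks_pairwise l (fun a b => a ≤ b) (fun c => le_refl c) pvDigits (by decide)

theorem pvSorted_desc (l : List Char) (hd : ∀ c ∈ l, c ∈ pvDigits) :
    PySem.List.sorted l (fun c => c) true =
      pvBlocks l ['9','8','7','6','5','4','3','2','1','0'] := by
  have hinj : Function.Injective (fun c : Char => -(c.toNat : Int)) := by
    intro a b h
    simp only [neg_inj, Int.natCast_inj] at h
    exact Char.ext (UInt32.toNat_inj.mp h)
  refine PySem.List.eq_of_perm_of_pairwise_le_of_injective (fun c : Char => -(c.toNat : Int))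
    hinj ?_ ?_ ?_
  · refine (PySem.List.sorted_perm l _ true).trans
      (pvBlocks_perm l _ (by decide) (fun c hc => ?_)).symm
    have h10 := hd c hc
    fin_cases h10 <;> decide
  · exact (PySem.List.sorted_pairwise_rev l (fun c : Char => c)).imp
      (fun {a b} hab => by
        have h2 : b.toNat ≤ a.toNat := Fin.mk_le_mk.mp hab
        show -(a.toNat : Int) ≤ -(b.toNat : Int)
        omega)
  · refine pvBlocks_pairwise l (fun a b => -(a.toNat : Int) ≤ -(b.toNat : Int))
      (fun c => le_refl _) _ (by decide)

theorem pvCnvSkip_spec (z : Nat) (m : Char) (hm : m ≠ '0') (t : List Char) :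
    cnvSkip (List.replicate z '0' ++ m :: t) = z := by
  induction z with
  | zero => simp [cnvSkip, hm]
  | succ z ih => simpa [cnvSkip, List.replicate_succ] using ih

theorem pvLead_split (l : List Char) (m : Char) (hcnt : 0 < l.count m) :
    ∀ ds : List Char, ds.Pairwise (· < ·) → m ∈ ds →
      (∀ d ∈ ds, l.count d ≠ 0 → m ≤ d) →
      pvBlocks l ds =
        m :: ds.flatMap (fun c => List.replicate (l.count c - if c = m then 1 else 0) c) := by
  intro ds
  induction ds with
  | nil => intro _ hm _; cases hm
  | cons c ds ih =>
    intro hpw hm' hmin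
    rw [List.pairwise_cons] at hpw
    by_cases hcm : c = m
    · subst hcm
      have htail : ds.flatMap (fun d => List.replicate (l.count d) d)
          = ds.flatMap (fun d => List.replicate (l.count d - if d = c then 1 else 0) d) := by
        apply List.flatMap_congr
        intro d hdm
        have hdc : d ≠ c := fun h => by
          have := hpw.1 d hdm
          subst h
          exact lt_irrefl _ this
        simp [hdc]
      simp only [pvBlocks, List.flatMap_cons] at *
      cases hc : l.count c with
      | zero => rw [hc] at hcnt; omega
      | succ k =>
        rw [List.replicate_succ]
        rw [← htail]
        simp
    · have hmds : m ∈ ds := by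
        rcases List.mem_cons.mp hm' with h | h
        · exact absurd h.symm hcm
        · exact h
      have hc0 : l.count c = 0 := by
        by_contra hne
        have h1 := hmin c List.mem_cons_self hne
        have h2 := hpw.1 m hmds
        exact absurd h1 (not_le.mpr h2)
      simp only [pvBlocks, List.flatMap_cons, hc0]
      rw [show (pvBlocks l ds : List Char)
            = ds.flatMap (fun c => List.replicate (l.count c) c) from rfl] at ih
      rw [ih hpw.2 hmds (fun d hdm hdc => hmin d (List.mem_cons_of_mem _ hdm) hdc)]
      simp



-- ===== VERDICT (by name: the statement is the Claim_ definition above) =====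
theorem cnv_spec : Claim_equal_cnv := by
  unfold Claim_equal_cnv
  intro n _
  unfold Spec_cnv cnv cnv_alt
  by_cases h0 : n = 0
  · simp [h0]
  by_cases hp : n > 0
  · have habs : |n| = n := abs_of_pos hp
    have hd := pvToChars_mem n (le_of_lt hp)
    simp only [beq_iff_eq, h0, if_false, if_pos hp, habs]
    rw [pvSorted_desc _ hd]
    congr 2
    simp [pvBlocks, PySem.List.pyRepeat_singleton, PySem.List.count_eq]
  · have hpos : (0:Int) < |n| := abs_pos.mpr h0
    have hd := pvToChars_mem |n| (abs_nonneg n)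
    obtain ⟨w, hwl, hw0⟩ := pvToChars_exists |n| hpos
    set l := PySem.Int.toChars |n| with hl
    have hF : l.filter (fun c => c != '0') ≠ [] := by
      intro hFe
      have hw : w ∈ l.filter (fun c => c != '0') :=
        List.mem_filter.mpr ⟨hwl, by simp [hw0]⟩
      simp [hFe] at hw
    obtain ⟨m, hmq⟩ : ∃ m, PySem.List.min? (l.filter (fun c => c != '0')) (fun c => c) = some m := by
      cases hq : PySem.List.min? (l.filter (fun c => c != '0')) (fun c => c) with
      | none => exact absurd ((PySem.List.min?_eq_none_iff _ _).mp hq) hF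
      | some m => exact ⟨m, rfl⟩
    have hmF := PySem.List.min?_mem hmq
    have hml : m ∈ l := (List.mem_filter.mp hmF).1
    have hm0 : m ≠ '0' := by
      have := (List.mem_filter.mp hmF).2
      simpa using this
    have hmin : ∀ y ∈ l, y ≠ '0' → m ≤ y := by
      intro y hy hy0
      exact PySem.List.min?_isMin hmq y (List.mem_filter.mpr ⟨hy, by simp [hy0]⟩)
    have hm19 : m ∈ (['1','2','3','4','5','6','7','8','9'] : List Char) := by
      have h10 := hd m hml
      fin_cases h10 <;> first | exact absurd rfl hm0 | decide
    have hcnt : 0 < l.count m := List.count_pos_iff.mpr hml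
    have hcond : ∀ d ∈ (['1','2','3','4','5','6','7','8','9'] : List Char),
        l.count d ≠ 0 → m ≤ d := by
      intro d hd19 hdc
      have hdl : d ∈ l := List.count_pos_iff.mp (Nat.pos_of_ne_zero hdc)
      have hd0 : d ≠ '0' := by fin_cases hd19 <;> decide
      exact hmin d hdl hd0
    have hsplit := pvLead_split l m hcnt ['1','2','3','4','5','6','7','8','9']
      (by decide) hm19 hcond
    set z := l.count '0' with hz
    set rest0 := (['1','2','3','4','5','6','7','8','9'] : List Char).flatMap
      (fun c => List.replicate (l.count c - if c = m then 1 else 0) c) with hrest0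
    have hsA : PySem.List.sorted l (fun c => c) false
        = List.replicate z '0' ++ (m :: rest0) := by
      rw [pvSorted_asc l hd]
      have hsplit0 : pvBlocks l pvDigits
          = List.replicate z '0' ++ pvBlocks l ['1','2','3','4','5','6','7','8','9'] := by
        rw [hz]
        simp only [pvBlocks, pvDigits, List.flatMap_cons]
      rw [hsplit0, hsplit]
    have hk : cnvSkip (List.replicate z '0' ++ (m :: rest0)) = z :=
      pvCnvSkip_spec z m hm0 rest0
    have hget : PySem.List.pyGet? (List.replicate z '0' ++ (m :: rest0)) (z : Int) = some m := by
      have h := PySem.List.pyGet?_append_length (List.replicate z '0') rest0 m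
      rw [List.length_replicate] at h
      exact h
    have hrep : PySem.List.pyRepeat ['0'] (z : Int) = List.replicate z '0' := by
      rw [PySem.List.pyRepeat_singleton]
      simp
    have hslice : PySem.List.slice (List.replicate z '0' ++ (m :: rest0))
        (some ((z : Int) + 1)) none = rest0 := by
      rw [PySem.List.slice_from _ (by omega : (0:Int) ≤ (z : Int) + 1)]
      rw [show ((z : Int) + 1).toNat = z + 1 by omega]
      rw [List.drop_append]
      simp
    have hrestB : (['1','2','3','4','5','6','7','8','9'] : List Char).flatMap
        (fun ch => PySem.List.pyRepeat [ch]
          ((PySem.List.count l ch : Int) - (if ch == m then 1 else 0)))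
        = rest0 := by
      rw [hrest0]
      apply List.flatMap_congr
      intro ch hch
      rw [PySem.List.pyRepeat_singleton, PySem.List.count_eq]
      by_cases hc : ch = m
      · subst hc
        have hc1 : 0 < List.count ch l := hcnt
        rw [if_pos rfl, if_pos (by simp : (ch == ch) = true)]
        congr 1
        omega
      · rw [if_neg hc, if_neg (by simp [hc] : ¬ ((ch == m) = true))]
        simp
    have hrep0 : PySem.List.pyRepeat ['0'] (PySem.List.count l '0' : Int)
        = List.replicate z '0' := by
      rw [PySem.List.pyRepeat_singleton, PySem.List.count_eq]
      simp [hz]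
    have hb : ((n == 0) : Bool) = false := by simp [h0]
    simp only [hb, Bool.false_eq_true, if_false, if_neg hp]
    rw [hsA, hk, hget, hrep, hslice, hmq]
    simp only [Option.getD_some]
    have hlists : ([m] ++ PySem.List.pyRepeat ['0'] (PySem.List.count l '0' : Int) ++
        List.flatMap (fun ch => PySem.List.pyRepeat [ch]
          ((PySem.List.count l ch : Int) - if ch == m then 1 else 0))
          ['1','2','3','4','5','6','7','8','9'] : List Char)
        = [m] ++ List.replicate z '0' ++ rest0 := by
      rw [hrep0, hrestB]
    exact congrArg (fun t : List Char => -(PySem.Int.ofChars? t).getD (0:Int)) hlists.symm
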